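-- pv_equiv track=rewrite | github.com/datahub-project/datahub | metadata-ingestion/src/datahub/ingestion/source/mock_data/datahub_mock_data.py | _calculate_lineage_tables
-- ===== SOURCE A (Python) =====
-- from typing import Dict, Iterable, List, Optional, Tuple, Union
--
-- def _calculate_lineage_tables(
--     fan_out: int, hops: int, fan_out_after_first: Optional[int] = None
-- ) -> Tuple[int, List[int]]:
--     """
--     Calculate the total number of tables and tables at each level for lineage generation.
--
--     Args:
--         fan_out: Number of downstream tables per upstream table at level 1
--         hops: Number of hops (levels) in the lineage graph
--         fan_out_after_first: Optional limit on fanout for hops after the first hop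
--
--     Returns:
--         Tuple of (total_tables, tables_at_levels) where tables_at_levels is a list
--         containing the number of tables at each level (index 0 = level 0, etc.)
--     """
--     tables_to_be_created = 0
--     tables_at_levels: List[int] = []
--
--     for i in range(hops + 1):
--         if i == 0:
--             # Level 0: always 1 table
--             tables_at_level = 1
--         elif i == 1:
--             # Level 1: uses lineage_fan_out
--             tables_at_level = fan_out
--         else:
--             # Level 2+: use fan_out_after_first_hop if set, otherwise exponential growth
--             if fan_out_after_first is not None:
--                 # Each table at previous level creates fan_out_after_first tables
--                 tables_at_level = tables_at_levels[i - 1] * fan_out_after_first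
--             else:
--                 # Original exponential behavior
--                 tables_at_level = fan_out**i
--
--         tables_at_levels.append(tables_at_level)
--         tables_to_be_created += tables_at_level
--
--     return tables_to_be_created, tables_at_levels
-- ===== SOURCE B (Python) =====
-- def _calculate_lineage_tables(fan_out, hops, fan_out_after_first=None):
--     step = fan_out if fan_out_after_first is None else fan_out_after_first
--     levels = []
--     if hops >= 0:
--         levels.append(1)
--     if hops >= 1:
--         levels.append(fan_out)
--     for _ in range(hops - 1):
--         levels.append(levels[-1] * step)
--     return sum(levels), levels
-- ===== Notes on version B (the rewrite author's own statement) =====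
-- stated objective: simpler
-- what changed: Replaces A's single loop with a three-way branch (constant / fan_out / power-or-indexed recurrence) and an in-loop running total by seeding levels 0 and 1 directly, growing the list with one uniform running-product step levels[-1]*step, and summing the finished list afterwards.
import Mathlib
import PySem

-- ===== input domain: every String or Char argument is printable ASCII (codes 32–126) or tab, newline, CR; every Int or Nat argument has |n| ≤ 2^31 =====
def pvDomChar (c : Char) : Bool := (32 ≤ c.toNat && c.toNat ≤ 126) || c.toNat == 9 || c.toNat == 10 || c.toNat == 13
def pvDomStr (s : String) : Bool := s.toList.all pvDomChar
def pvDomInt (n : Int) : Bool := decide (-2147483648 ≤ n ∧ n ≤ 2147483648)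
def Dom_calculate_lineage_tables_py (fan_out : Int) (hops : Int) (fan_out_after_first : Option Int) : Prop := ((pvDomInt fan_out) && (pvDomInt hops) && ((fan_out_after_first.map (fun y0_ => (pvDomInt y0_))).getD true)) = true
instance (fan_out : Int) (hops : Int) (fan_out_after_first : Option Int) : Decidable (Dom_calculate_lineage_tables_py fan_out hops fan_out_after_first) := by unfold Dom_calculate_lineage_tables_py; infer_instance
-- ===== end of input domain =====

-- B replaces A's three-way branch inside one accumulating loop by seeding levels 0 and 1
-- up front, extending with a uniform running-product recurrence, and summing afterwards (objective: simpler).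

-- ===== PORT A =====
-- loop body of A's 'for i in range(hops + 1)' (state = (tables_to_be_created, tables_at_levels))
def pvAstep (fan_out : Int) (fan_out_after_first : Option Int)
    (st : Int × List Int) (i : Int) : Int × List Int :=
  let tables_at_level : Int :=
    if i = 0 then 1
    else if i = 1 then fan_out
    else
      match fan_out_after_first with
      | some s => PySem.List.pyGetD st.2 (i - 1) 0 * s  -- tables_at_levels[i-1]; index provably in range
      | none => fan_out ^ i.toNat                        -- fan_out ** i, i ≥ 0 here
  (st.1 + tables_at_level, st.2 ++ [tables_at_level])

def calculate_lineage_tables_py (fan_out : Int) (hops : Int) (fan_out_after_first : Option Int) : Int × List Int :=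
  (PySem.List.pyRange 0 (hops + 1)).foldl (pvAstep fan_out fan_out_after_first) (0, [])

-- ===== PORT B =====
-- loop body of B's 'for _ in range(hops - 1)': append levels[-1] * step
def pvBstep (step : Int) (ls : List Int) (_i : Int) : List Int :=
  ls ++ [PySem.List.pyGetD ls (-1) 0 * step]  -- levels[-1]; levels provably nonempty here

def calculate_lineage_tables_py_alt (fan_out : Int) (hops : Int) (fan_out_after_first : Option Int) : Int × List Int :=
  let step : Int := match fan_out_after_first with | none => fan_out | some s => s
  let base : List Int := (if 0 ≤ hops then [1] else []) ++ (if 1 ≤ hops then [fan_out] else [])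
  let levels : List Int := (PySem.List.pyRange 0 (hops - 1)).foldl (pvBstep step) base
  (levels.sum, levels)

-- ===== PRECONDITION & SPEC =====
def Spec_calculate_lineage_tables_py (fan_out : Int) (hops : Int) (fan_out_after_first : Option Int) (out : Int × List Int) : Prop := out = calculate_lineage_tables_py_alt fan_out hops fan_out_after_first
instance (fan_out : Int) (hops : Int) (fan_out_after_first : Option Int) (out : Int × List Int) : Decidable (Spec_calculate_lineage_tables_py fan_out hops fan_out_after_first out) := by unfold Spec_calculate_lineage_tables_py; infer_instance

-- ===== CLAIM (what is proved, stated in full; the proofs are below) =====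
def Claim_equal_calculate_lineage_tables_py : Prop := ∀ (fan_out : Int) (hops : Int) (fan_out_after_first : Option Int), Dom_calculate_lineage_tables_py fan_out hops fan_out_after_first → Spec_calculate_lineage_tables_py fan_out hops fan_out_after_first (calculate_lineage_tables_py fan_out hops fan_out_after_first)

-- ===== LEMMAS AND PROOFS =====

-- the mathematical level sizes: level 0 = 1, level 1 = f, level n+2 = level (n+1) * st
def pvLv (f st : Int) : Nat → Int
  | 0 => 1
  | 1 => f
  | n + 2 => pvLv f st (n + 1) * st

def pvLvls (f st : Int) (n : Nat) : List Int := (List.range n).map (pvLv f st)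

theorem pvLv_pow (f : Int) : ∀ n, pvLv f f n = f ^ n
  | 0 => by simp [pvLv]
  | 1 => by simp [pvLv]
  | n + 2 => by rw [pvLv, pvLv_pow f (n + 1)]; ring

theorem pvLvls_succ (f st : Int) (n : Nat) :
    pvLvls f st (n + 1) = pvLvls f st n ++ [pvLv f st n] := by
  simp [pvLvls, List.range_succ]

-- levels[-1] of a nonempty list is its last element
theorem pvGetLast (xs : List Int) (x : Int) : PySem.List.pyGetD (xs ++ [x]) (-1) 0 = x := by
  have h : PySem.List.pyIdx? (xs.length + 1) (-1) = some xs.length := by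
    simp [PySem.List.pyIdx?]
  simp [PySem.List.pyGetD, PySem.List.pyGet?, h]

-- A's loop over range(n) builds exactly the level list and its running sum
theorem pvA_loop (f : Int) (faf : Option Int) (n : Nat) :
    (PySem.List.pyRange 0 (n : Int)).foldl (pvAstep f faf) (0, [])
      = ((pvLvls f (faf.getD f) n).sum, pvLvls f (faf.getD f) n) := by
  induction n with
  | zero =>
    rw [PySem.List.pyRange_one_eq_nil (by omega)]
    simp [pvLvls]
  | succ n ih =>
    rw [show ((n + 1 : Nat) : Int) = (n : Int) + 1 by push_cast; ring,
        PySem.List.pyRange_one_succ_right (by omega), List.foldl_append, ih]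
    simp only [List.foldl_cons, List.foldl_nil]
    rw [pvLvls_succ]
    match n with
    | 0 => simp [pvAstep, pvLvls, pvLv]
    | 1 => simp [pvAstep, pvLvls, pvLv, List.range_succ]
    | m + 2 =>
      have h0 : ((m + 2 : Nat) : Int) ≠ 0 := by omega
      have h1 : ((m + 2 : Nat) : Int) ≠ 1 := by omega
      cases faf with
      | none =>
        simp only [pvAstep, if_neg h0, if_neg h1, Option.getD_none]
        have ht : ((m : Int) + 2).toNat = m + 2 := by omega
        simp [ht, pvLv_pow]
      | some s =>
        simp only [pvAstep, if_neg h0, if_neg h1, Option.getD_some]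
        have hidx : ((m + 2 : Nat) : Int) - 1 = ((m + 1 : Nat) : Int) := by push_cast; ring
        rw [hidx, PySem.List.pyGetD_natCast]
        have : (pvLvls f s (m + 2)).getD (m + 1) 0 = pvLv f s (m + 1) := by
          simp [pvLvls, PySem.List.getD_map_range (pvLv f s) (m + 2) (m + 1) 0 (by omega)]
        rw [this]
        simp [pvLv]

-- B's loop over range(m), started from the first two levels, builds the level list
theorem pvB_loop (f st : Int) (m : Nat) :
    (PySem.List.pyRange 0 (m : Int)).foldl (pvBstep st) (pvLvls f st 2)
      = pvLvls f st (m + 2) := by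
  induction m with
  | zero => rw [PySem.List.pyRange_one_eq_nil (by omega)]; rfl
  | succ m ih =>
    rw [show ((m + 1 : Nat) : Int) = (m : Int) + 1 by push_cast; ring,
        PySem.List.pyRange_one_succ_right (by omega), List.foldl_append, ih]
    simp only [List.foldl_cons, List.foldl_nil, pvBstep]
    rw [pvLvls_succ f st (m + 2), pvLvls_succ f st (m + 1), pvGetLast]
    have : pvLv f st (m + 2) = pvLv f st (m + 1) * st := rfl
    rw [this]

-- the step expression in B is faf.getD f
theorem pvStep_eq (f : Int) (faf : Option Int) :
    (match faf with | none => f | some s => s) = faf.getD f := by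
  cases faf <;> rfl

-- both ports compute (sum of levels, levels) for the same level list
theorem pvMain (f hops : Int) (faf : Option Int) (st : Int)
    (hstd : faf.getD f = st) :
    calculate_lineage_tables_py f hops faf = calculate_lineage_tables_py_alt f hops faf := by
  unfold calculate_lineage_tables_py calculate_lineage_tables_py_alt
  simp only [pvStep_eq, hstd]
  rcases lt_trichotomy hops 0 with hneg | h0 | hpos
  · -- hops < 0: both loops are empty and B's base is empty
    rw [PySem.List.pyRange_one_eq_nil (by omega), PySem.List.pyRange_one_eq_nil (by omega)]
    simp [if_neg (by omega : ¬ (0:Int) ≤ hops), if_neg (by omega : ¬ (1:Int) ≤ hops)]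
  · -- hops = 0: A does one iteration (level 0), B's base is [1] and its loop is empty
    subst h0
    have h1 : PySem.List.pyRange 0 (0 + 1) = [0] := by decide
    have h2 : PySem.List.pyRange 0 (0 - 1) = [] := by decide
    rw [h1, h2]
    simp [pvAstep]
  · -- hops ≥ 1
    obtain ⟨m, hm⟩ : ∃ m : Nat, hops = (m : Int) + 1 := ⟨(hops - 1).toNat, by omega⟩
    subst hm
    have hA : ((m : Int) + 1) + 1 = ((m + 2 : Nat) : Int) := by push_cast; ring
    have hB : ((m : Int) + 1) - 1 = ((m : Nat) : Int) := by ring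
    rw [hA, hB, pvA_loop f faf (m + 2), hstd]
    have hbase : (if (0:Int) ≤ (m : Int) + 1 then [(1:Int)] else []) ++ (if (1:Int) ≤ (m : Int) + 1 then [f] else []) = pvLvls f st 2 := by
      rw [if_pos (by omega), if_pos (by omega)]
      simp [pvLvls, pvLv, List.range_succ]
    rw [hbase, pvB_loop f st m]

-- ===== VERDICT (by name: the statement is the Claim_ definition above) =====
theorem calculate_lineage_tables_py_spec : Claim_equal_calculate_lineage_tables_py := by
  intro f hops faf _dom
  exact pvMain f hops faf (faf.getD f) rfl
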